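-- pv_equiv track=rewrite | github.com/MrBrantCode/unitest_baseline | mut_generate/mist_train_cf/cf_90746/solution.py | group_and_sort
-- ===== SOURCE A (Python) =====
-- def group_and_sort(lst, key1, key2):
--     """
--     This function groups a list of dictionaries by the first key and sorts the groups in descending order based on the sum of the values of the first key.
--     If two groups have the same sum, they are sorted based on the minimum value of the second key.
--
--     Args:
--         lst (list): A list of dictionaries.
--         key1 (str): The first key to group and sort by.
--         key2 (str): The second key to sort by in case of a tie.
--
--     Returns:
--         list: A list of the sorted groups.
--     """
--     # Group the list by the shared key
--     grouped_list = {}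
--     for dictionary in lst:
--         value = dictionary[key1]
--         if value in grouped_list:
--             grouped_list[value].append(dictionary)
--         else:
--             grouped_list[value] = [dictionary]
--
--     # Sort the groups in descending order based on the sum of the shared key
--     sorted_groups = sorted(grouped_list.values(), key=lambda x: sum(dictionary[key1] for dictionary in x), reverse=True)
--
--     # Sort the groups with the same sum based on the minimum value of the other key
--     sorted_groups = sorted(sorted_groups, key=lambda x: min(dictionary[key2] for dictionary in x))
--
--     return sorted_groups
-- ===== SOURCE B (Python) =====
-- def group_and_sort(lst, key1, key2):
--     """One grouping pass that also maintains each group's sum of key1 and min of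
--     key2 incrementally, followed by a single stable sort on the composite key
--     (min key2 asc, sum key1 desc)."""
--     groups = {}
--     for d in lst:
--         v = d[key1]
--         g = groups.get(v)
--         if g is None:
--             groups[v] = [[d], v, d[key2]]
--         else:
--             g[0].append(d)
--             g[1] += v
--             if d[key2] < g[2]:
--                 g[2] = d[key2]
--     return [g[0] for g in sorted(groups.values(), key=lambda g: (g[2], -g[1]))]
-- ===== Notes on version B (the rewrite author's own statement) =====
-- stated objective: alternative
-- what changed: B's grouping pass maintains each group's sum of key1 and min of key2 incrementally (so the per-group aggregate scans disappear) and replaces A's two successive stable sorts by a single stable sort on the composite key (min key2 asc, negated sum desc), relying on sort stability for identical tie-breaking.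
import Mathlib
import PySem

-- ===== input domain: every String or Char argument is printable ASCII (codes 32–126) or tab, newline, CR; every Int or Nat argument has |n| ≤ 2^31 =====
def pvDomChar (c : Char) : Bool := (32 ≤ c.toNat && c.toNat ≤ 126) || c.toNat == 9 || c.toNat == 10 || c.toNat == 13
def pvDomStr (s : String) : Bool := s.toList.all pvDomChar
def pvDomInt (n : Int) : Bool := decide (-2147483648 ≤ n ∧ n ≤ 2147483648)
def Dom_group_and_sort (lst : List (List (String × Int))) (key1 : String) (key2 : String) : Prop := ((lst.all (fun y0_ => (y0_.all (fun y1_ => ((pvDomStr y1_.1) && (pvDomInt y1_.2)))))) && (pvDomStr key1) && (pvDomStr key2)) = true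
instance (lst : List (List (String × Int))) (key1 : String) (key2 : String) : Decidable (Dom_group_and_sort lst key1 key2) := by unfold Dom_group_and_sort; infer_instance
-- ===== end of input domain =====

-- B replaces A's two successive stable sorts (sum desc, then min asc) by one grouping pass that
-- maintains each group's sum/min incrementally plus a single stable sort on the composite key
-- (min key2 asc, sum key1 desc); objective: alternative/simpler decomposition, same result.


-- ===== PORT A =====
-- shared helper: d[k] for a Python dict d (assoc list); the default 0 is unreachable under
-- Pre_group_and_sort (Python raises KeyError exactly where get? is none).
def pyGetIntD (d : List (String × Int)) (k : String) : Int :=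
  PySem.Dict.getD (PySem.Dict.mk d) k 0

def group_and_sort (lst : List (List (String × Int))) (key1 : String) (key2 : String) :
    List (List (List (String × Int))) :=
  -- Group the list by the shared key
  let grouped : PySem.Dict Int (List (List (String × Int))) :=
    lst.foldl (fun g d =>
      let value := pyGetIntD d key1
      if PySem.Dict.contains g value then
        PySem.Dict.insert g value (PySem.Dict.getD g value [] ++ [d])
      else
        PySem.Dict.insert g value [d]) (PySem.Dict.mk [])
  -- Sort the groups in descending order based on the sum of the shared key
  let sortedGroups := PySem.List.sorted (PySem.Dict.values grouped)
      (fun x => (x.map (fun dd => pyGetIntD dd key1)).sum) true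
  -- Sort the groups with the same sum based on the minimum value of the other key
  PySem.List.sorted sortedGroups
      (fun x => (PySem.List.min? (x.map (fun dd => pyGetIntD dd key2)) (fun y => y)).getD 0) false

-- ===== PORT B =====
def group_and_sort_alt (lst : List (List (String × Int))) (key1 : String) (key2 : String) :
    List (List (List (String × Int))) :=
  -- one pass: per key1-value keep (members, running sum of key1, running min of key2)
  let groups : PySem.Dict Int ((List (List (String × Int))) × Int × Int) :=
    lst.foldl (fun g d =>
      let v := pyGetIntD d key1
      match PySem.Dict.get? g v with
      | none => PySem.Dict.insert g v ([d], v, pyGetIntD d key2)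
      | some t =>
          let w := pyGetIntD d key2
          PySem.Dict.insert g v (t.1 ++ [d], t.2.1 + v, if w < t.2.2 then w else t.2.2)) (PySem.Dict.mk [])
  -- single stable sort on the composite key (min key2 asc, sum key1 desc)
  (PySem.List.sorted2 (PySem.Dict.values groups) (fun t => t.2.2) (fun t => -t.2.1) false).map
    (fun t => t.1)

-- ===== PRECONDITION & SPEC =====
-- Pre_ excludes exactly the inputs where Python A raises KeyError: some dict lacks key1 or key2.
def Pre_group_and_sort (lst : List (List (String × Int))) (key1 : String) (key2 : String) : Prop :=
  ∀ d ∈ lst, (PySem.Dict.get? (PySem.Dict.mk d) key1).isSome = true ∧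
             (PySem.Dict.get? (PySem.Dict.mk d) key2).isSome = true
instance (lst : List (List (String × Int))) (key1 : String) (key2 : String) : Decidable (Pre_group_and_sort lst key1 key2) := by unfold Pre_group_and_sort; infer_instance
def pvWitness_group_and_sort : (List (List (String × Int))) × String × String :=
  ([[("a", 1), ("b", 2)], [("a", 1), ("b", 0)]], "a", "b")

def Spec_group_and_sort (lst : List (List (String × Int))) (key1 : String) (key2 : String) (out : List (List (List (String × Int)))) : Prop := out = group_and_sort_alt lst key1 key2
instance (lst : List (List (String × Int))) (key1 : String) (key2 : String) (out : List (List (List (String × Int)))) : Decidable (Spec_group_and_sort lst key1 key2 out) := by unfold Spec_group_and_sort; infer_instance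

-- ===== CLAIM (what is proved, stated in full; the proofs are below) =====
def Claim_equal_group_and_sort : Prop := ∀ (lst : List (List (String × Int))) (key1 : String) (key2 : String), Dom_group_and_sort lst key1 key2 → Pre_group_and_sort lst key1 key2 → Spec_group_and_sort lst key1 key2 (group_and_sort lst key1 key2)

-- ===== LEMMAS AND PROOFS =====

-- the lexicographic comparator (g asc, f desc) that one stable sort of B uses
def pvBL {α : Type} (g f : α → Int) (a b : α) : Bool :=
  decide (g a < g b) || (!decide (g b < g a) && decide (f b < f a))

lemma pvBL_iff {α : Type} (g f : α → Int) (a b : α) :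
    pvBL g f a b = true ↔ (g a < g b ∨ (¬ g b < g a ∧ f b < f a)) := by
  simp [pvBL]

lemma pvBL_trans {α : Type} (g f : α → Int) (a b c : α)
    (h1 : pvBL g f a b = true) (h2 : pvBL g f b c = true) : pvBL g f a c = true := by
  rw [pvBL_iff] at *; omega

lemma pvBL_asym {α : Type} (g f : α → Int) (a b : α)
    (h : pvBL g f a b = true) : pvBL g f b a = false := by
  rw [pvBL_iff] at h
  rw [← Bool.not_eq_true, pvBL_iff]; omega

lemma pvBL_total_of_f_lt {α : Type} (g f : α → Int) (x q : α) (h : f q < f x) :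
    pvBL g f x q = true ∨ pvBL g f q x = true := by
  rw [pvBL_iff, pvBL_iff]; omega

-- two inserts with strictly ordered elements commute
lemma insertBy_comm {α : Type} (lt : α → α → Bool)
    (htr : ∀ a b c, lt a b = true → lt b c = true → lt a c = true)
    (x p : α) (hxp : lt x p = true) (hpx : lt p x = false) :
    ∀ S, PySem.List.insertBy lt p (PySem.List.insertBy lt x S)
        = PySem.List.insertBy lt x (PySem.List.insertBy lt p S) := by
  intro S
  induction S with
  | nil => simp [PySem.List.insertBy, hxp, hpx]
  | cons y S' ih =>
      by_cases h1 : lt x y = true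
      · by_cases h2 : lt p y = true
        · simp [PySem.List.insertBy, h1, h2, hxp, hpx]
        · simp [PySem.List.insertBy, h1, h2, hpx]
      · by_cases h2 : lt p y = true
        · exact absurd (htr x p y hxp h2) h1
        · simp [PySem.List.insertBy, h1, h2, ih]

lemma foldl_insertBy_comm {α : Type} (lt : α → α → Bool)
    (htr : ∀ a b c, lt a b = true → lt b c = true → lt a c = true)
    (hasym : ∀ a b, lt a b = true → lt b a = false)
    (x : α) :
    ∀ (Q : List α) (S : List α), (∀ q ∈ Q, lt x q = true ∨ lt q x = true) →
    Q.foldl (fun acc z => PySem.List.insertBy lt z acc) (PySem.List.insertBy lt x S)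
      = PySem.List.insertBy lt x (Q.foldl (fun acc z => PySem.List.insertBy lt z acc) S) := by
  intro Q
  induction Q with
  | nil => intro S _; rfl
  | cons q Q' ih =>
      intro S hq
      have hstep : PySem.List.insertBy lt q (PySem.List.insertBy lt x S)
          = PySem.List.insertBy lt x (PySem.List.insertBy lt q S) := by
        rcases hq q (by simp) with h | h
        · exact insertBy_comm lt htr x q h (hasym x q h) S
        · exact (insertBy_comm lt htr q x h (hasym q x h) S).symm
      simp only [List.foldl_cons, hstep]
      exact ih (PySem.List.insertBy lt q S) (fun z hz => hq z (by simp [hz]))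

-- insert of x through the lex fold, when x is inserted by the descending-f comparator
lemma foldl_bl_of_insert_rev {α : Type} (g f : α → Int) (x : α) :
    ∀ (R : List α) (acc : List α), R.Pairwise (fun a b => f b ≤ f a) →
    (PySem.List.insertBy (fun a b => decide (f b < f a)) x R).foldl
        (fun acc z => PySem.List.insertBy (pvBL g f) z acc) acc
      = PySem.List.insertBy (pvBL g f) x
          (R.foldl (fun acc z => PySem.List.insertBy (pvBL g f) z acc) acc) := by
  intro R
  induction R with
  | nil => intro acc _; rfl
  | cons y R' ih =>
      intro acc hp
      by_cases hfy : f y < f x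
      · have hins : PySem.List.insertBy (fun a b => decide (f b < f a)) x (y :: R')
            = x :: y :: R' := by simp [PySem.List.insertBy, hfy]
        rw [hins]
        simp only [List.foldl_cons]
        exact foldl_insertBy_comm (pvBL g f) (pvBL_trans g f) (pvBL_asym g f) x (y :: R') acc
          (by
            intro q hqmem
            apply pvBL_total_of_f_lt
            rcases List.mem_cons.mp hqmem with rfl | hmem
            · exact hfy
            · have := (List.pairwise_cons.mp hp).1 q hmem
              omega)
      · have hins : PySem.List.insertBy (fun a b => decide (f b < f a)) x (y :: R')
            = y :: PySem.List.insertBy (fun a b => decide (f b < f a)) x R' := by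
          simp [PySem.List.insertBy, hfy]
        rw [hins]
        simp only [List.foldl_cons]
        exact ih (PySem.List.insertBy (pvBL g f) y acc) (List.pairwise_cons.mp hp).2

lemma insertBy_congr {α : Type} (b1 b2 : α → α → Bool) (x : α) :
    ∀ ys, (∀ y ∈ ys, b1 x y = b2 x y) →
    PySem.List.insertBy b1 x ys = PySem.List.insertBy b2 x ys := by
  intro ys
  induction ys with
  | nil => intro _; rfl
  | cons y ys ih =>
      intro h
      have hy := h y (by simp)
      simp only [PySem.List.insertBy, ← hy]
      by_cases hb : b1 x y = true
      · simp [hb]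
      · simp [hb, ih (fun z hz => h z (by simp [hz]))]

-- stable sort by g of an f-descending list is the lex (g asc, f desc) insertion sort
lemma foldl_bg_eq_bl {α : Type} (g f : α → Int) :
    ∀ (R acc : List α), R.Pairwise (fun a b => f b ≤ f a) →
    (∀ y ∈ acc, ∀ z ∈ R, f z ≤ f y) →
    R.foldl (fun acc z => PySem.List.insertBy (fun a b => decide (g a < g b)) z acc) acc
      = R.foldl (fun acc z => PySem.List.insertBy (pvBL g f) z acc) acc := by
  intro R
  induction R with
  | nil => intro acc _ _; rfl
  | cons x R' ih =>
      intro acc hp hacc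
      simp only [List.foldl_cons]
      have hcong : PySem.List.insertBy (fun a b => decide (g a < g b)) x acc
          = PySem.List.insertBy (pvBL g f) x acc := by
        apply insertBy_congr
        intro y hy
        have hle : f x ≤ f y := hacc y hy x (by simp)
        simp [pvBL, show ¬ (f y < f x) from by omega]
      rw [hcong]
      exact ih (PySem.List.insertBy (pvBL g f) x acc) (List.pairwise_cons.mp hp).2
        (by
          intro y hy z hz
          rcases (PySem.List.mem_insertBy _ _ _ _).mp hy with rfl | hy'
          · exact (List.pairwise_cons.mp hp).1 z hz
          · exact hacc y hy' z (by simp [hz]))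

lemma sorted2_unfold {α : Type} (xs : List α) (k1 k2 : α → Int) :
    PySem.List.sorted2 xs k1 k2 false
      = xs.foldl (fun acc x => PySem.List.insertBy
          (fun a b => decide (k1 a < k1 b) || (!decide (k1 b < k1 a) && decide (k2 a < k2 b))) x acc) [] := rfl

-- the heart: A's two stable sorts equal one lex insertion sort over the unsorted list
lemma two_sorts_eq_lex {α : Type} (g f : α → Int) (xs : List α) :
    PySem.List.sorted (PySem.List.sorted xs f true) g false
      = xs.foldl (fun acc z => PySem.List.insertBy (pvBL g f) z acc) [] := by
  rw [PySem.List.sorted_eq_foldl_insertBy]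
  rw [foldl_bg_eq_bl g f (PySem.List.sorted xs f true) []
      (PySem.List.sorted_pairwise_rev xs f) (by simp)]
  induction xs using List.reverseRecOn with
  | nil => rfl
  | append_singleton xs x ih =>
      have h1 : PySem.List.sorted (xs ++ [x]) f true
          = PySem.List.insertBy (fun a b => decide (f b < f a)) x (PySem.List.sorted xs f true) := by
        rw [PySem.List.sorted_rev_eq_foldl_insertBy, PySem.List.sorted_rev_eq_foldl_insertBy,
          List.foldl_append]
        rfl
      rw [h1,
        foldl_bl_of_insert_rev g f x (PySem.List.sorted xs f true) []
          (PySem.List.sorted_pairwise_rev xs f),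
        ih, List.foldl_append]
      rfl

lemma map_insertBy {α β : Type} (φ : α → β) (b2 : β → β → Bool) (b1 : α → α → Bool)
    (hc : ∀ a c, b2 (φ a) (φ c) = b1 a c) (x : α) :
    ∀ ys, (PySem.List.insertBy b1 x ys).map φ = PySem.List.insertBy b2 (φ x) (ys.map φ) := by
  intro ys
  induction ys with
  | nil => rfl
  | cons y ys ih => simp only [PySem.List.insertBy, List.map_cons, hc]
                    by_cases hb : b1 x y = true <;> simp [hb, ih]

lemma foldl_insertBy_map {α β : Type} (φ : α → β) (b2 : β → β → Bool) (b1 : α → α → Bool)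
    (hc : ∀ a c, b2 (φ a) (φ c) = b1 a c) :
    ∀ (L acc : List α),
    (L.map φ).foldl (fun acc z => PySem.List.insertBy b2 z acc) (acc.map φ)
      = (L.foldl (fun acc z => PySem.List.insertBy b1 z acc) acc).map φ := by
  intro L
  induction L with
  | nil => intro acc; rfl
  | cons x L ih =>
      intro acc
      simp only [List.map_cons, List.foldl_cons, ← map_insertBy φ b2 b1 hc x acc]
      exact ih _

-- ---- the group keys and the simulation between the two dicts ----
def pvSum (key1 : String) (x : List (List (String × Int))) : Int :=
  (x.map (fun dd => pyGetIntD dd key1)).sum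
def pvMin (key2 : String) (x : List (List (String × Int))) : Int :=
  (PySem.List.min? (x.map (fun dd => pyGetIntD dd key2)) (fun y => y)).getD 0
def pvPhi (key1 key2 : String) (x : List (List (String × Int))) :
    (List (List (String × Int))) × Int × Int := (x, pvSum key1 x, pvMin key2 x)
def pvMapD (key1 key2 : String) (dA : PySem.Dict Int (List (List (String × Int)))) :
    PySem.Dict Int ((List (List (String × Int))) × Int × Int) :=
  ⟨dA.items.map (fun p => (p.1, pvPhi key1 key2 p.2))⟩

def stepA (key1 : String) (g : PySem.Dict Int (List (List (String × Int))))
    (d : List (String × Int)) : PySem.Dict Int (List (List (String × Int))) :=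
  if PySem.Dict.contains g (pyGetIntD d key1) then
    PySem.Dict.insert g (pyGetIntD d key1)
      (PySem.Dict.getD g (pyGetIntD d key1) [] ++ [d])
  else
    PySem.Dict.insert g (pyGetIntD d key1) [d]

def stepB (key1 key2 : String) (g : PySem.Dict Int ((List (List (String × Int))) × Int × Int))
    (d : List (String × Int)) : PySem.Dict Int ((List (List (String × Int))) × Int × Int) :=
  match PySem.Dict.get? g (pyGetIntD d key1) with
  | none => PySem.Dict.insert g (pyGetIntD d key1) ([d], pyGetIntD d key1, pyGetIntD d key2)
  | some t =>
      PySem.Dict.insert g (pyGetIntD d key1)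
        (t.1 ++ [d], t.2.1 + pyGetIntD d key1,
          if pyGetIntD d key2 < t.2.2 then pyGetIntD d key2 else t.2.2)

lemma find?_map_fst {T U : Type} (φ : T → U) (v : Int) :
    ∀ (items : List (Int × T)),
    List.find? (fun p => p.1 == v) (items.map (fun p => (p.1, φ p.2)))
      = Option.map (fun p => (p.1, φ p.2)) (List.find? (fun p => p.1 == v) items) := by
  intro items
  induction items with
  | nil => rfl
  | cons p items ih =>
      by_cases h : p.1 == v
      · simp [List.find?, h]
      · simp only [List.map_cons, List.find?, h]
        exact ih

lemma contains_eq_isSome_get? {ν : Type} (dA : PySem.Dict Int ν) (v : Int) :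
    PySem.Dict.contains dA v = (PySem.Dict.get? dA v).isSome := by
  cases dA with
  | mk items =>
      simp only [PySem.Dict.contains, PySem.Dict.get?, Option.isSome_map]
      induction items with
      | nil => rfl
      | cons p items ih => by_cases h : p.1 == v <;> simp [List.find?, h, ih]

lemma mem_values_of_get? {ν : Type} (dA : PySem.Dict Int ν) (v : Int) (L : ν)
    (h : PySem.Dict.get? dA v = some L) : L ∈ PySem.Dict.values dA := by
  cases dA with
  | mk items =>
      simp only [PySem.Dict.get?, Option.map_eq_some_iff] at h
      obtain ⟨p, hp, rfl⟩ := h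
      exact List.mem_map.mpr ⟨p, List.mem_of_find?_eq_some hp, rfl⟩

lemma mapD_get? (key1 key2 : String) (dA : PySem.Dict Int (List (List (String × Int)))) (v : Int) :
    PySem.Dict.get? (pvMapD key1 key2 dA) v
      = (PySem.Dict.get? dA v).map (pvPhi key1 key2) := by
  cases dA with
  | mk items =>
      simp only [pvMapD, PySem.Dict.get?, find?_map_fst]
      cases List.find? (fun p => p.1 == v) items <;> rfl

lemma mapD_contains (key1 key2 : String) (dA : PySem.Dict Int (List (List (String × Int)))) (v : Int) :
    PySem.Dict.contains (pvMapD key1 key2 dA) v = PySem.Dict.contains dA v := by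
  rw [contains_eq_isSome_get?, contains_eq_isSome_get?, mapD_get?]
  cases PySem.Dict.get? dA v <;> rfl

lemma mapD_insert (key1 key2 : String) (dA : PySem.Dict Int (List (List (String × Int))))
    (v : Int) (w : List (List (String × Int))) :
    PySem.Dict.insert (pvMapD key1 key2 dA) v (pvPhi key1 key2 w)
      = pvMapD key1 key2 (PySem.Dict.insert dA v w) := by
  cases dA with
  | mk items =>
      simp only [PySem.Dict.insert, mapD_contains]
      by_cases hc : PySem.Dict.contains (PySem.Dict.mk items) v = true
      · simp only [hc, if_true, pvMapD, List.map_map]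
        congr 1
        apply List.map_congr_left
        intro p _
        by_cases h : p.1 == v <;> simp [h, Function.comp]
      · simp only [hc, if_false, Bool.false_eq_true, pvMapD, List.map_append, List.map_cons,
          List.map_nil]

lemma mapD_values (key1 key2 : String) (dA : PySem.Dict Int (List (List (String × Int)))) :
    PySem.Dict.values (pvMapD key1 key2 dA)
      = (PySem.Dict.values dA).map (pvPhi key1 key2) := by
  cases dA with
  | mk items => simp [pvMapD, PySem.Dict.values, List.map_map, Function.comp]

lemma mem_values_insert {ν : Type} (dA : PySem.Dict Int ν) (k : Int) (w L : ν)
    (h : L ∈ PySem.Dict.values (PySem.Dict.insert dA k w)) :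
    L = w ∨ L ∈ PySem.Dict.values dA := by
  cases dA with
  | mk items =>
      by_cases hc : PySem.Dict.contains (PySem.Dict.mk items) k = true
      · simp only [PySem.Dict.insert, hc, if_true, PySem.Dict.values, List.map_map] at h
        obtain ⟨p, hp, hval⟩ := List.mem_map.mp h
        by_cases hpk : (p.1 == k) = true
        · left; simp only [Function.comp, hpk, if_true] at hval; exact hval.symm
        · right
          simp only [Function.comp, hpk, Bool.false_eq_true, if_false] at hval
          exact List.mem_map.mpr ⟨p, hp, hval⟩
      · simp only [PySem.Dict.insert, hc, Bool.false_eq_true, if_false, PySem.Dict.values,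
          List.map_append, List.map_cons, List.map_nil] at h
        rcases List.mem_append.mp h with hold | hnew
        · right; exact hold
        · left; simpa using hnew

lemma pvMin_single (key2 : String) (d : List (String × Int)) :
    pvMin key2 [d] = pyGetIntD d key2 := by
  simp [pvMin, PySem.List.min?]

lemma pvMin_append (key2 : String) (L : List (List (String × Int))) (d : List (String × Int))
    (hL : L ≠ []) :
    pvMin key2 (L ++ [d]) = if pyGetIntD d key2 < pvMin key2 L then pyGetIntD d key2
                            else pvMin key2 L := by
  have key : ∀ (A : List Int) (w m : Int), PySem.List.min? A (fun y => y) = some m →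
      PySem.List.min? (A ++ [w]) (fun y => y) = some (if w < m then w else m) := by
    intro A w m hm
    simp only [PySem.List.min?] at hm ⊢
    rw [List.foldl_append, hm]
    simp only [List.foldl_cons, List.foldl_nil]
    by_cases h : w < m <;> simp [h]
  obtain ⟨m, hm⟩ : ∃ m, PySem.List.min? (L.map (fun dd => pyGetIntD dd key2)) (fun y => y)
      = some m := by
    cases h : PySem.List.min? (L.map (fun dd => pyGetIntD dd key2)) (fun y => y) with
    | none =>
        exact absurd ((PySem.List.min?_eq_none_iff _ _).mp h) (by simp [hL])
    | some m => exact ⟨m, rfl⟩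
  unfold pvMin
  rw [List.map_append, List.map_cons, List.map_nil, key _ _ _ hm, hm]
  simp only [Option.getD_some]

lemma fold_mapD (key1 key2 : String) :
    ∀ (lst : List (List (String × Int))) (dA : PySem.Dict Int (List (List (String × Int)))),
    (∀ L ∈ PySem.Dict.values dA, L ≠ []) →
    lst.foldl (stepB key1 key2) (pvMapD key1 key2 dA)
        = pvMapD key1 key2 (lst.foldl (stepA key1) dA)
    ∧ (∀ L ∈ PySem.Dict.values (lst.foldl (stepA key1) dA), L ≠ []) := by
  intro lst
  induction lst with
  | nil => intro dA h; exact ⟨rfl, h⟩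
  | cons d lst ih =>
      intro dA h
      have hstep : stepB key1 key2 (pvMapD key1 key2 dA) d = pvMapD key1 key2 (stepA key1 dA d) := by
        unfold stepA stepB
        rw [mapD_get?]
        cases hq : PySem.Dict.get? dA (pyGetIntD d key1) with
        | none =>
            have hc : PySem.Dict.contains dA (pyGetIntD d key1) = false := by
              rw [contains_eq_isSome_get?, hq]; rfl
            simp only [Option.map_none, hc, Bool.false_eq_true, if_false]
            have harg : (([d], pyGetIntD d key1, pyGetIntD d key2) :
                (List (List (String × Int))) × Int × Int) = pvPhi key1 key2 [d] := by
              simp [pvPhi, pvSum, pvMin_single]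
            rw [harg, mapD_insert]
        | some L =>
            have hc : PySem.Dict.contains dA (pyGetIntD d key1) = true := by
              rw [contains_eq_isSome_get?, hq]; rfl
            have hLne : L ≠ [] := h L (mem_values_of_get? dA _ L hq)
            have hgetD : PySem.Dict.getD dA (pyGetIntD d key1) [] = L := by
              simp [PySem.Dict.getD, hq]
            simp only [Option.map_some, hc, if_true]
            have harg : ((pvPhi key1 key2 L).1 ++ [d], (pvPhi key1 key2 L).2.1 + pyGetIntD d key1,
                if pyGetIntD d key2 < (pvPhi key1 key2 L).2.2 then pyGetIntD d key2
                else (pvPhi key1 key2 L).2.2) = pvPhi key1 key2 (L ++ [d]) := by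
              simp only [pvPhi, pvMin_append key2 L d hLne]
              simp [pvSum]
            rw [harg, hgetD, mapD_insert]
      have hnon : ∀ L ∈ PySem.Dict.values (stepA key1 dA d), L ≠ [] := by
        intro L hL
        unfold stepA at hL
        by_cases hc : PySem.Dict.contains dA (pyGetIntD d key1) = true
        · simp only [hc, if_true] at hL
          rcases mem_values_insert _ _ _ _ hL with rfl | hold
          · simp
          · exact h L hold
        · simp only [hc, Bool.false_eq_true, if_false] at hL
          rcases mem_values_insert _ _ _ _ hL with rfl | hold
          · simp
          · exact h L hold
      simp only [List.foldl_cons, hstep]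
      exact ih (stepA key1 dA d) hnon

-- ===== VERDICT (by name: the statement is the Claim_ definition above) =====
theorem group_and_sort_spec : Claim_equal_group_and_sort := by
  unfold Claim_equal_group_and_sort Spec_group_and_sort
  intro lst key1 key2 _ _
  have hfold := fold_mapD key1 key2 lst ⟨[]⟩ (by intro L hL; simp [PySem.Dict.values] at hL)
  have hA : group_and_sort lst key1 key2
      = PySem.List.sorted
          (PySem.List.sorted (PySem.Dict.values (lst.foldl (stepA key1) ⟨[]⟩))
            (fun x => pvSum key1 x) true)
          (fun x => pvMin key2 x) false := rfl
  have hB : group_and_sort_alt lst key1 key2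
      = (PySem.List.sorted2 (PySem.Dict.values (lst.foldl (stepB key1 key2) (pvMapD key1 key2 ⟨[]⟩)))
          (fun t => t.2.2) (fun t => -t.2.1) false).map (fun t => t.1) := rfl
  rw [hA, hB, hfold.1, mapD_values, sorted2_unfold,
    two_sorts_eq_lex (fun x => pvMin key2 x) (fun x => pvSum key1 x)]
  have hc : ∀ a c, (fun (a b : (List (List (String × Int))) × Int × Int) =>
        decide (a.2.2 < b.2.2) || (!decide (b.2.2 < a.2.2) && decide (-a.2.1 < -b.2.1)))
        (pvPhi key1 key2 a) (pvPhi key1 key2 c)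
      = pvBL (fun x => pvMin key2 x) (fun x => pvSum key1 x) a c := by
    intro a c
    have hiff : (-(pvSum key1 a) < -(pvSum key1 c)) ↔ (pvSum key1 c < pvSum key1 a) := by omega
    simp only [pvPhi, pvBL, hiff]
    rfl
  have hmap := foldl_insertBy_map (pvPhi key1 key2)
    (fun (a b : (List (List (String × Int))) × Int × Int) =>
      decide (a.2.2 < b.2.2) || (!decide (b.2.2 < a.2.2) && decide (-a.2.1 < -b.2.1)))
    (pvBL (fun x => pvMin key2 x) (fun x => pvSum key1 x)) hc
    (PySem.Dict.values (lst.foldl (stepA key1) ⟨[]⟩)) []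
  simp only [List.map_nil] at hmap
  rw [hmap, List.map_map]
  have hid : ((fun (t : (List (List (String × Int))) × Int × Int) => t.1) ∘ pvPhi key1 key2)
      = id := funext (fun x => rfl)
  rw [hid, List.map_id]
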